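-- pv_equiv track=rewrite | github.com/admin-masters/Ai-cme | rag_pipeline/script2.py | fix_headings
-- ===== SOURCE A (Python) =====
-- def _is_heading_fragment(line: str) -> bool:
--     """
--     Return True if a line looks like a heading or heading continuation:
--       - Predominantly uppercase (>80% of letters)
--       - Contains at least one semicolon
--     Does NOT require the line to end with ';' — that's how we detect fragments.
--     """
--     stripped = line.strip()
--     if not stripped or ";" not in stripped:
--         return False
--     letters = [c for c in stripped if c.isalpha()]
--     if not letters:
--         return False
--     return sum(c.isupper() for c in letters) / len(letters) > 0.80
--
-- def _ends_heading(line: str) -> bool: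
--     """A heading is complete when its non-whitespace tail is a semicolon."""
--     return line.rstrip().endswith(";")
--
-- def fix_headings(text: str) -> str:
--     """
--     Join heading lines that were split across multiple lines by PDF extraction.
--
--     Rules:
--     - A heading fragment is an all-caps line containing ';' that does NOT end with ';'.
--     - Keep accumulating subsequent all-caps+semicolon lines until we find one ending with ';'.
--     - Join fragments with a single space.
--     - Everything else (body text, references, URLs, blank lines) passes through unchanged.
--     """
--     lines = text.splitlines(keepends=True)
--     out: list[str] = []
--     i = 0
--
--     while i < len(lines):
--         line = lines[i]
--         stripped = line.rstrip("\n\r")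
--
--         if _is_heading_fragment(stripped):
--             # Accumulate until heading is complete (ends with ';')
--             accumulated = stripped.rstrip()
--             j = i + 1
--
--             while not _ends_heading(accumulated) and j < len(lines):
--                 next_stripped = lines[j].rstrip("\n\r")
--
--                 # Only merge if next line also looks like a heading fragment
--                 next_letters = [c for c in next_stripped if c.isalpha()]
--                 next_is_caps = (
--                     next_letters and
--                     sum(c.isupper() for c in next_letters) / len(next_letters) > 0.80
--                 )
--
--                 if next_is_caps and next_stripped.strip():
--                     accumulated = accumulated + " " + next_stripped.strip()
--                     j += 1
--                 else:
--                     # Body text — stop merging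
--                     break
--
--             # Preserve line ending
--             line_ending = "\n" if lines[j - 1].endswith("\n") else ""
--             out.append(accumulated + line_ending)
--             i = j
--
--         else:
--             out.append(line)
--             i += 1
--
--     return "".join(out)
-- ===== SOURCE B (Python) =====
-- def _caps_mostly(s: str) -> bool:
--     """>80% of the letters in s are uppercase (and there is at least one letter)."""
--     letters = [c for c in s if c.isalpha()]
--     return bool(letters) and sum(c.isupper() for c in letters) / len(letters) > 0.80
--
-- def _is_heading_fragment(line: str) -> bool:
--     stripped = line.strip()
--     return bool(stripped) and ";" in stripped and _caps_mostly(stripped)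
--
-- def _ends_heading(line: str) -> bool:
--     return line.rstrip().endswith(";")
--
-- def fix_headings(text: str) -> str:
--     """Single pass over the lines carrying a pending-heading buffer (no index jumping)."""
--     out: list[str] = []
--     pending = None  # (accumulated_heading, last_consumed_line_ended_with_newline)
--     for line in text.splitlines(keepends=True):
--         stripped = line.rstrip("\n\r")
--         if pending is not None:
--             # continuation rule: mostly-caps and non-blank (no ';' required)
--             if _caps_mostly(stripped) and stripped.strip():
--                 acc = pending[0] + " " + stripped.strip()
--                 if _ends_heading(acc):
--                     out.append(acc + ("\n" if line.endswith("\n") else ""))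
--                     pending = None
--                 else:
--                     pending = (acc, line.endswith("\n"))
--                 continue
--             # body text: flush the pending heading, then treat this line afresh
--             out.append(pending[0] + ("\n" if pending[1] else ""))
--             pending = None
--         if _is_heading_fragment(stripped):
--             acc = stripped.rstrip()
--             if _ends_heading(acc):
--                 out.append(acc + ("\n" if line.endswith("\n") else ""))
--             else:
--                 pending = (acc, line.endswith("\n"))
--         else:
--             out.append(line)
--     if pending is not None:
--         out.append(pending[0] + ("\n" if pending[1] else ""))
--     return "".join(out)
-- ===== Notes on version B (the rewrite author's own statement) =====
-- stated objective: simpler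
-- what changed: Replaced A's index-jumping outer loop with a nested accumulation loop by a single linear pass over the lines carrying a pending-heading buffer (accumulated text + line-ending flag) that is flushed on completion, on body text, or at EOF.
import Mathlib
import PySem

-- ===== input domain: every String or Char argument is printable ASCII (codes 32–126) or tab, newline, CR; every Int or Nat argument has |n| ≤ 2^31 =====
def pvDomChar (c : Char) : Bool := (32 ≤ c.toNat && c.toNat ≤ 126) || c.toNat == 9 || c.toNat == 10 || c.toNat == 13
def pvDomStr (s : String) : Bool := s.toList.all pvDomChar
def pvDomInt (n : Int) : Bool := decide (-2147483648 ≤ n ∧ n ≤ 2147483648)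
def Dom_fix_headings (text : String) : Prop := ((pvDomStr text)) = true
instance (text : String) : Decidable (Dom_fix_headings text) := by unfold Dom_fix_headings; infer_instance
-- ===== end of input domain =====

-- B replaces A's index-jumping outer loop + inner accumulation loop by one linear pass with a
-- pending-heading buffer; the equivalence proved below holds for ALL strings.

-- ===== SHARED PRIMITIVE PORTS (both Pythons call these built-ins identically) =====

-- text.splitlines(keepends=True): exact on the Dom charset, where the only line boundaries
-- are '\n', '\r' and '\r\n' (Python's further boundary characters lie outside Dom).
def pvSplitKeepAux : List Char → List Char → List (List Char)
  | acc, [] => if acc.isEmpty then [] else [acc.reverse]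
  | acc, '\r' :: '\n' :: rest => (acc.reverse ++ ['\r', '\n']) :: pvSplitKeepAux [] rest
  | acc, '\n' :: rest => (acc.reverse ++ ['\n']) :: pvSplitKeepAux [] rest
  | acc, '\r' :: rest => (acc.reverse ++ ['\r']) :: pvSplitKeepAux [] rest
  | acc, c :: rest => pvSplitKeepAux (c :: acc) rest

def pvSplitKeep (cs : List Char) : List (List Char) := pvSplitKeepAux [] cs

-- line.rstrip("\n\r")
def stripNL (l : List Char) : List Char :=
  (l.reverse.dropWhile (fun c => c == '\n' || c == '\r')).reverse

-- line.endswith("\n")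
def hasNL (l : List Char) : Bool := PySem.Chars.endswith l ['\n']

-- '"\n" if <ends with newline> else ""'
def nlOf (b : Bool) : List Char := if b then ['\n'] else []

-- _ends_heading(line): line.rstrip().endswith(";")  (identical helper in both Pythons)
def endsH (l : List Char) : Bool := PySem.Chars.endswith (PySem.Chars.rstrip l) [';']

-- ===== PORT A =====

-- _is_heading_fragment, A's version (guard chain).  The float test
-- sum(isupper)/len(letters) > 0.80 is ported as the exact integer inequality
-- 4*len < 5*sum (equal to the float comparison for every line of length below 10^15).
def fragA (line : List Char) : Bool :=
  if (PySem.Chars.strip line).isEmpty || !PySem.Chars.isIn [';'] (PySem.Chars.strip line) then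
    false
  else
    if ((PySem.Chars.strip line).filter PySem.Chars.isalpha).isEmpty then false
    else
      decide (4 * ((PySem.Chars.strip line).filter PySem.Chars.isalpha).length <
        5 * ((PySem.Chars.strip line).filter PySem.Chars.isalpha).countP PySem.Chars.isupper)

-- A's inner 'while not _ends_heading(accumulated) and j < len(lines)' loop:
-- returns (accumulated, lines[j-1], lines[j:])  (prev plays lines[j-1];
-- the 'next_is_caps and next_stripped.strip()' test is written out inline, ratio as above).
def innerA (acc : List Char) (rest : List (List Char)) (prev : List Char) :
    List Char × List Char × List (List Char) :=
  if endsH acc then (acc, prev, rest)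
  else
    match rest with
    | [] => (acc, prev, [])
    | l :: ls =>
      if (!((stripNL l).filter PySem.Chars.isalpha).isEmpty &&
            decide (4 * ((stripNL l).filter PySem.Chars.isalpha).length <
              5 * ((stripNL l).filter PySem.Chars.isalpha).countP PySem.Chars.isupper)) &&
          !(PySem.Chars.strip (stripNL l)).isEmpty then
        innerA (acc ++ ' ' :: PySem.Chars.strip (stripNL l)) ls l
      else (acc, prev, rest)

theorem innerA_len (acc : List Char) (rest : List (List Char)) (prev : List Char) :
    (innerA acc rest prev).2.2.length ≤ rest.length := by
  induction rest generalizing acc prev with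
  | nil => rw [innerA]; split <;> simp
  | cons l ls ih =>
    rw [innerA]
    split
    · simp
    · split
      · exact le_trans (ih _ _) (by simp)
      · simp

-- A's outer while loop over the line index ('stripped' and the innerA result triple written inline)
def loopA : List (List Char) → List (List Char)
  | [] => []
  | l :: ls =>
    if fragA (stripNL l) then
      ((innerA (PySem.Chars.rstrip (stripNL l)) ls l).1
          ++ nlOf (hasNL (innerA (PySem.Chars.rstrip (stripNL l)) ls l).2.1))
        :: loopA (innerA (PySem.Chars.rstrip (stripNL l)) ls l).2.2
    else l :: loopA ls
  termination_by lines => lines.length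
  decreasing_by
  · exact Nat.lt_succ_of_le (innerA_len _ _ _)
  · simp

def fix_headings (text : String) : String :=
  String.ofList (PySem.Chars.join [] (loopA (pvSplitKeep text.toList)))

-- ===== PORT B =====

-- _caps_mostly(s): >80% of the letters uppercase and at least one letter (same integer form)
def capsMostly (s : List Char) : Bool :=
  !(s.filter PySem.Chars.isalpha).isEmpty &&
    decide (4 * (s.filter PySem.Chars.isalpha).length <
      5 * (s.filter PySem.Chars.isalpha).countP PySem.Chars.isupper)

-- _is_heading_fragment, B's version (one conjunction, reusing _caps_mostly)
def fragB (line : List Char) : Bool :=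
  !(PySem.Chars.strip line).isEmpty &&
    PySem.Chars.isIn [';'] (PySem.Chars.strip line) &&
    capsMostly (PySem.Chars.strip line)

-- B's single pass: state = pending heading buffer (accumulated, last consumed line had '\n').
-- The 'continue'-less fall-through after a flush is written out inline.
def loopB : List (List Char) → Option (List Char × Bool) → List (List Char)
  | [], none => []
  | [], some (acc, nl) => [acc ++ nlOf nl]
  | l :: ls, none =>
    if fragB (stripNL l) then
      if endsH (PySem.Chars.rstrip (stripNL l)) then
        (PySem.Chars.rstrip (stripNL l) ++ nlOf (hasNL l)) :: loopB ls none
      else loopB ls (some (PySem.Chars.rstrip (stripNL l), hasNL l))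
    else l :: loopB ls none
  | l :: ls, some (acc, nl) =>
    if capsMostly (stripNL l) && !(PySem.Chars.strip (stripNL l)).isEmpty then
      if endsH (acc ++ ' ' :: PySem.Chars.strip (stripNL l)) then
        ((acc ++ ' ' :: PySem.Chars.strip (stripNL l)) ++ nlOf (hasNL l)) :: loopB ls none
      else loopB ls (some (acc ++ ' ' :: PySem.Chars.strip (stripNL l), hasNL l))
    else
      (acc ++ nlOf nl) ::
        (if fragB (stripNL l) then
          if endsH (PySem.Chars.rstrip (stripNL l)) then
            (PySem.Chars.rstrip (stripNL l) ++ nlOf (hasNL l)) :: loopB ls none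
          else loopB ls (some (PySem.Chars.rstrip (stripNL l), hasNL l))
        else l :: loopB ls none)

def fix_headings_alt (text : String) : String :=
  String.ofList (PySem.Chars.join [] (loopB (pvSplitKeep text.toList) none))

-- ===== PRECONDITION & SPEC =====
def Spec_fix_headings (text : String) (out : String) : Prop := out = fix_headings_alt text
instance (text : String) (out : String) : Decidable (Spec_fix_headings text out) := by unfold Spec_fix_headings; infer_instance

-- ===== CLAIM (what is proved, stated in full; the proofs are below) =====
def Claim_equal_fix_headings : Prop := ∀ (text : String), Dom_fix_headings text → Spec_fix_headings text (fix_headings text)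

-- ===== LEMMAS AND PROOFS =====

theorem frag_eq (l : List Char) : fragA l = fragB l := by
  simp only [fragA, fragB, capsMostly]
  by_cases h1 : (PySem.Chars.strip l).isEmpty = true <;>
    by_cases h2 : PySem.Chars.isIn [';'] (PySem.Chars.strip l) = true <;>
      by_cases h3 : ((PySem.Chars.strip l).filter PySem.Chars.isalpha).isEmpty = true <;>
        simp [h1, h2, h3]

-- The combined induction: A's outer loop equals B's pass in the no-pending state, and
-- A's inner accumulation loop (plus its flush and the outer continuation) equals B's
-- pass in the pending state.
theorem loopAB (n : ℕ) : ∀ ls : List (List Char), ls.length ≤ n →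
    (loopA ls = loopB ls none) ∧
    (∀ acc prev, endsH acc = false →
      ((innerA acc ls prev).1 ++ nlOf (hasNL (innerA acc ls prev).2.1)) ::
          loopA (innerA acc ls prev).2.2
        = loopB ls (some (acc, hasNL prev))) := by
  induction n with
  | zero =>
    intro ls hls
    have : ls = [] := List.eq_nil_of_length_eq_zero (Nat.le_zero.mp hls)
    subst this
    refine ⟨by rw [loopA]; rfl, ?_⟩
    intro acc prev h
    rw [innerA.eq_def]
    simp [h, loopA, loopB]
  | succ n ih =>
    intro ls hls
    cases ls with
    | nil =>
      refine ⟨by rw [loopA]; rfl, ?_⟩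
      intro acc prev h
      rw [innerA.eq_def]
      simp [h, loopA, loopB]
    | cons l ls' =>
      have hls' : ls'.length ≤ n := by
        simpa using Nat.lt_succ_iff.mp (Nat.lt_of_lt_of_le (by simp) hls)
      obtain ⟨ihm, iha⟩ := ih ls' hls'
      have M : loopA (l :: ls') = loopB (l :: ls') none := by
        by_cases hf : fragA (stripNL l) = true
        · have hfB : fragB (stripNL l) = true := frag_eq (stripNL l) ▸ hf
          by_cases he : endsH (PySem.Chars.rstrip (stripNL l)) = true
          · rw [loopA, if_pos hf, innerA.eq_def, if_pos he]
            simp only [loopB]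
            simp [hfB, he, ihm]
          · have heF : endsH (PySem.Chars.rstrip (stripNL l)) = false :=
              Bool.eq_false_iff.mpr he
            have h2 := iha (PySem.Chars.rstrip (stripNL l)) l heF
            rw [loopA, if_pos hf]
            simp only [loopB]
            simp only [hfB, heF, Bool.false_eq_true, if_false, if_true]
            exact h2
        · have hfB : fragB (stripNL l) = false :=
            frag_eq (stripNL l) ▸ Bool.eq_false_iff.mpr hf
          rw [loopA, if_neg hf]
          simp only [loopB]
          simp [hfB, ihm]
      refine ⟨M, ?_⟩
      intro acc prev hends
      rw [innerA.eq_def, if_neg (by simp [hends])]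
      by_cases hc : ((!((stripNL l).filter PySem.Chars.isalpha).isEmpty &&
            decide (4 * ((stripNL l).filter PySem.Chars.isalpha).length <
              5 * ((stripNL l).filter PySem.Chars.isalpha).countP PySem.Chars.isupper)) &&
          !(PySem.Chars.strip (stripNL l)).isEmpty) = true
      · have hc' : (capsMostly (stripNL l) && !(PySem.Chars.strip (stripNL l)).isEmpty) = true := by
          simpa [capsMostly] using hc
        simp only [if_pos hc]
        by_cases he : endsH (acc ++ ' ' :: PySem.Chars.strip (stripNL l)) = true
        · rw [innerA.eq_def, if_pos he]
          simp only [loopB]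
          simp [hc', he, ihm]
        · have heF : endsH (acc ++ ' ' :: PySem.Chars.strip (stripNL l)) = false :=
            Bool.eq_false_iff.mpr he
          have h2 := iha (acc ++ ' ' :: PySem.Chars.strip (stripNL l)) l heF
          simp only [loopB]
          simp only [hc', heF, Bool.false_eq_true, if_false, if_true]
          exact h2
      · have hc' : (capsMostly (stripNL l) && !(PySem.Chars.strip (stripNL l)).isEmpty) = false := by
          have := Bool.eq_false_iff.mpr hc
          simpa [capsMostly] using this
        simp only [if_neg hc]
        simp only [loopB]
        simp only [hc', Bool.false_eq_true, if_false]
        rw [M]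
        simp only [loopB]

-- ===== VERDICT (by name: the statement is the Claim_ definition above) =====
theorem fix_headings_spec : Claim_equal_fix_headings := by
  intro text _
  unfold Spec_fix_headings fix_headings fix_headings_alt
  rw [(loopAB (pvSplitKeep text.toList).length (pvSplitKeep text.toList) le_rfl).1]
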